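-- pv_equiv track=rewrite | github.com/IamPoi/Algorithm_Study | lotto.py | solution
-- ===== SOURCE A (Python) =====
-- def solution(lottos, win_nums):
--     answer = []
--
--     cnt = 0
--     zero = 0
--
--     for i in range(len(lottos)):
--         if lottos[i] in win_nums:
--             cnt = cnt + 1
--         if lottos[i] == 0:
--             zero = zero + 1
--
--     max = cnt + zero
--
--     if max == 6:
--         answer.append(1)
--     elif max == 5:
--         answer.append(2)
--     elif max == 4:
--         answer.append(3)
--     elif max == 3:
--         answer.append(4)
--     elif max == 2:
--         answer.append(5)
--     else:
--         answer.append(6)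
--
--     if cnt == 6:
--         answer.append(1)
--     elif cnt == 5:
--         answer.append(2)
--     elif cnt == 4:
--         answer.append(3)
--     elif cnt == 3:
--         answer.append(4)
--     elif cnt == 2:
--         answer.append(5)
--     else:
--         answer.append(6)
--
--     return answer
-- ===== SOURCE B (Python) =====
-- def solution(lottos, win_nums):
--     # Sort both lists, then count matches with a two-pointer merge scan.
--     L = sorted(lottos)
--     W = sorted(win_nums)
--     i = j = cnt = 0
--     while i < len(L) and j < len(W):
--         if L[i] < W[j]:
--             i += 1
--         elif L[i] > W[j]:
--             j += 1
--         else: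
--             cnt += 1
--             i += 1
--     zero = L.count(0)
--
--     def rank(c):
--         return 7 - c if 2 <= c <= 6 else 6
--
--     return [rank(cnt + zero), rank(cnt)]
-- ===== Notes on version B (the rewrite author's own statement) =====
-- stated objective: faster
-- what changed: Replaces A's per-element membership scan over win_nums with sort-both-lists plus a two-pointer merge to count matches, and both six-branch rank chains with the arithmetic formula 7-c clamped to 6 outside 2..6.
import Mathlib
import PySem

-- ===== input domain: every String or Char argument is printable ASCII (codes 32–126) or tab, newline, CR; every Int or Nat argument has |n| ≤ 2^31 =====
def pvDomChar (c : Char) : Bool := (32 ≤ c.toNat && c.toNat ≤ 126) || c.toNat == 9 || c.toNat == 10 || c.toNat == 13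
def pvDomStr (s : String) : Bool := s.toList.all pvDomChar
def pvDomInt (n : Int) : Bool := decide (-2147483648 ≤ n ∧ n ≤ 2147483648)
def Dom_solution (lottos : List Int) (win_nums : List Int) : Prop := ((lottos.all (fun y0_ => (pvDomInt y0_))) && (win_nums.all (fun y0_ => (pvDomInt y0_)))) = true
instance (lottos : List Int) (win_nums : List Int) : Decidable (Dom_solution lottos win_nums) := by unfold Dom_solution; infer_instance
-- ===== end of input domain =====

-- B sorts both lists and counts matches with a two-pointer merge scan, then maps counts to ranks by the arithmetic formula 7-c clamped to 6 outside 2..6 (objective: faster, measured).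

-- ===== PORT A =====
def solution (lottos : List Int) (win_nums : List Int) : List Int :=
  -- for i in range(len(lottos)): count matches and zeros (index always in range, so pyGetD is exact)
  let p := (PySem.List.pyRange 0 (PySem.List.len lottos) 1).foldl
    (fun (s : Int × Int) i =>
      let x := PySem.List.pyGetD lottos i 0
      let s1 := if win_nums.contains x then (s.1 + 1, s.2) else s
      if x = 0 then (s1.1, s1.2 + 1) else s1) (0, 0)
  let cnt := p.1
  let mx := cnt + p.2
  (if mx = 6 then [1] else if mx = 5 then [2] else if mx = 4 then [3]
   else if mx = 3 then [4] else if mx = 2 then [5] else [6]) ++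
  (if cnt = 6 then [1] else if cnt = 5 then [2] else if cnt = 4 then [3]
   else if cnt = 3 then [4] else if cnt = 2 then [5] else [6])

-- ===== PORT B =====
-- the while loop of Source B over the two sorted lists, as structural recursion on the suffixes
def mergeCnt : List Int → List Int → Int
  | [], _ => 0
  | _ :: _, [] => 0
  | l :: ls, w :: ws =>
    if l < w then mergeCnt ls (w :: ws)
    else if w < l then mergeCnt (l :: ls) ws
    else mergeCnt ls (w :: ws) + 1
termination_by L W => L.length + W.length

-- rank(c) = 7 - c if 2 <= c <= 6 else 6
def rank (c : Int) : Int := if 2 ≤ c ∧ c ≤ 6 then 7 - c else 6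

def solution_alt (lottos : List Int) (win_nums : List Int) : List Int :=
  let L := PySem.List.sorted lottos (fun x => x) false
  let W := PySem.List.sorted win_nums (fun x => x) false
  let cnt := mergeCnt L W
  let zcnt := PySem.List.count L 0
  [rank (cnt + zcnt), rank cnt]

-- ===== PRECONDITION & SPEC =====
def Spec_solution (lottos : List Int) (win_nums : List Int) (out : List Int) : Prop := out = solution_alt lottos win_nums
instance (lottos : List Int) (win_nums : List Int) (out : List Int) : Decidable (Spec_solution lottos win_nums out) := by unfold Spec_solution; infer_instance

-- ===== CLAIM (what is proved, stated in full; the proofs are below) =====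
def Claim_equal_solution : Prop := ∀ (lottos : List Int) (win_nums : List Int), Dom_solution lottos win_nums → Spec_solution lottos win_nums (solution lottos win_nums)

-- ===== LEMMAS AND PROOFS =====

-- A's if/elif chain computes exactly B's clamped arithmetic rank
theorem rank_chain_eq (c : Int) :
    (if c = 6 then ([1] : List Int) else if c = 5 then [2] else if c = 4 then [3]
     else if c = 3 then [4] else if c = 2 then [5] else [6]) = [rank c] := by
  unfold rank
  split_ifs <;> simp_all <;> omega

-- A's single loop over the elements computes (matches, zeros) from any accumulator
theorem solution_loop_eq (lottos win_nums : List Int) (a b : Int) :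
    lottos.foldl
      (fun (s : Int × Int) x =>
        let s1 := if win_nums.contains x then (s.1 + 1, s.2) else s
        if x = 0 then (s1.1, s1.2 + 1) else s1) (a, b)
    = (a + (lottos.countP (fun x => win_nums.contains x) : Int),
       b + (lottos.count 0 : Int)) := by
  induction lottos generalizing a b with
  | nil => simp
  | cons y ys ih =>
    rw [List.foldl_cons]
    have hstep :
        (let s1 := if win_nums.contains y = true then ((a, b).1 + 1, (a, b).2) else (a, b)
         if y = 0 then (s1.1, s1.2 + 1) else s1)
        = (a + (if win_nums.contains y then 1 else 0), b + (if y = 0 then 1 else 0)) := by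
      dsimp only
      split_ifs <;> simp
    rw [hstep, ih, List.countP_cons, List.count_cons]
    refine Prod.ext ?_ ?_ <;> dsimp only <;> split_ifs <;> simp_all <;> omega

-- on sorted inputs the two-pointer merge counts exactly the lotto elements present in W
theorem mergeCnt_eq (L W : List Int) (hL : L.Pairwise (· ≤ ·)) (hW : W.Pairwise (· ≤ ·)) :
    mergeCnt L W = (L.countP (fun x => W.contains x) : Int) := by
  fun_induction mergeCnt L W with
  | case1 W => simp
  | case2 l ls => simp
  | case3 l ls w ws hlt ih =>
    -- l < w ≤ every element of w::ws, so l is not in w::ws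
    have hnot : (w :: ws).contains l = false := by
      have h1 : ∀ y ∈ ws, w ≤ y := (List.pairwise_cons.mp hW).1
      simp only [List.contains_eq_mem, decide_eq_false_iff_not, List.mem_cons, not_or]
      refine ⟨by omega, fun hmem => ?_⟩
      have := h1 l hmem
      omega
    rw [List.countP_cons, ih (List.pairwise_cons.mp hL).2 hW, hnot]
    simp
  | case4 l ls w ws hlt hgt ih =>
    -- w < l ≤ every element of l::ls, so dropping w changes no membership
    have hcongr : (l :: ls).countP (fun x => (w :: ws).contains x)
        = (l :: ls).countP (fun x => ws.contains x) := by
      apply List.countP_congr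
      intro x hx
      have hxl : l ≤ x := by
        rcases List.mem_cons.mp hx with rfl | hmem
        · exact le_refl x
        · exact (List.pairwise_cons.mp hL).1 x hmem
      have hne : x ≠ w := by omega
      simp [List.contains_eq_mem, List.mem_cons, hne]
    rw [hcongr, ih hL (List.pairwise_cons.mp hW).2]
  | case5 l ls w ws hlt hgt ih =>
    have heq : l = w := by omega
    rw [List.countP_cons, ih (List.pairwise_cons.mp hL).2 hW]
    simp [List.contains_eq_mem, heq]

-- ===== VERDICT (by name: the statement is the Claim_ definition above) =====
theorem solution_spec : Claim_equal_solution := by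
  intro lottos win_nums _
  show solution lottos win_nums = solution_alt lottos win_nums
  unfold solution solution_alt
  rw [PySem.List.foldl_pyRange_zero_pyGetD lottos 0
        (fun (s : Int × Int) x =>
          let s1 := if win_nums.contains x then (s.1 + 1, s.2) else s
          if x = 0 then (s1.1, s1.2 + 1) else s1) (0, 0),
      solution_loop_eq lottos win_nums 0 0]
  have hpermL := PySem.List.sorted_perm lottos (fun x => x) false
  have hpermW := PySem.List.sorted_perm win_nums (fun x => x) false
  have hcnt : mergeCnt (PySem.List.sorted lottos (fun x => x) false)
      (PySem.List.sorted win_nums (fun x => x) false)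
      = (lottos.countP (fun x => win_nums.contains x) : Int) := by
    rw [mergeCnt_eq _ _ (PySem.List.sorted_pairwise lottos (fun x => x))
        (PySem.List.sorted_pairwise win_nums (fun x => x))]
    have h1 : (PySem.List.sorted lottos (fun x => x) false).countP
        (fun x => (PySem.List.sorted win_nums (fun x => x) false).contains x)
        = (PySem.List.sorted lottos (fun x => x) false).countP
        (fun x => win_nums.contains x) := by
      apply List.countP_congr
      intro x _
      simp [List.contains_eq_mem, hpermW.mem_iff]
    rw [h1, hpermL.countP_eq]
  have hzero : PySem.List.count (PySem.List.sorted lottos (fun x => x) false) 0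
      = (lottos.count 0 : Int) := by
    rw [PySem.List.count_eq, hpermL.count_eq]
  simp only [hcnt, hzero, zero_add]
  rw [rank_chain_eq, rank_chain_eq]
  simp
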